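-- pv_equiv track=rewrite | github.com/heyhenry/python-problemsolving | 2026/February/Problem_Sets/pset_01/second_vowel.py | second_vowel
-- ===== SOURCE A (Python) =====
-- def second_vowel(s : str) -> int:
--     vowels = "aeiou"
--     vowel_counter = 0
--     for i in range(len(s)):
--         if s[i] in vowels or (vowel_counter >= 1 and s[i] == "y"):
--             vowel_counter += 1
--         if vowel_counter == 2:
--             return i
--     return -1
-- ===== SOURCE B (Python) =====
-- def _find_from(s, start):
--     # first index >= start whose char is in "aeiouy" ('y' admissible after the first vowel)
--     for j in range(start, len(s)):
--         if s[j] in "aeiouy":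
--             return j
--     return -1
--
-- def second_vowel(s: str) -> int:
--     for i, ch in enumerate(s):
--         if ch in "aeiou":
--             return _find_from(s, i + 1)
--     return -1
-- ===== Notes on version B (the rewrite author's own statement) =====
-- stated objective: simpler
-- what changed: Replaces A's single stateful counting pass with two sequential searches: first index of a real vowel (aeiou), then the first index after it of a char in aeiouy.
import Mathlib
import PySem

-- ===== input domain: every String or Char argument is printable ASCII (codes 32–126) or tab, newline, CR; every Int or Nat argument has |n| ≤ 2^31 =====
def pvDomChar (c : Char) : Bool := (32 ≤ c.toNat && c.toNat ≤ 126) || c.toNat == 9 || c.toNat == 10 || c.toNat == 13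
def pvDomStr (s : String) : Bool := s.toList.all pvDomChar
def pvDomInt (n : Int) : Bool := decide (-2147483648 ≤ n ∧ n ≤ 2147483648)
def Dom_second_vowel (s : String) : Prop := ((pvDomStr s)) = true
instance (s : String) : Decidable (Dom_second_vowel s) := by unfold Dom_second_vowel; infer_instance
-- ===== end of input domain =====

-- B replaces A's single stateful counting pass with two sequential searches (aeiou, then aeiouy after it): simpler decomposition, same cost.


-- ===== PORT A =====
-- loop over the characters with the running index i and the vowel_counter c
def svALoop : List Char → Int → Int → Int
  | [], _, _ => -1
  | ch :: t, i, c =>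
    let c' := if ch ∈ "aeiou".toList ∨ (c ≥ 1 ∧ ch = 'y') then c + 1 else c
    if c' = 2 then i else svALoop t (i + 1) c'

def second_vowel (s : String) : Int := svALoop s.toList 0 0

-- ===== PORT B =====
-- _find_from: first index ≥ start of a char in "aeiouy"
def svFindFrom : List Char → Int → Int
  | [], _ => -1
  | ch :: t, j => if ch ∈ "aeiouy".toList then j else svFindFrom t (j + 1)

-- enumerate loop of B: first char in "aeiou", then search the rest
def svBLoop : List Char → Int → Int
  | [], _ => -1
  | ch :: t, i => if ch ∈ "aeiou".toList then svFindFrom t (i + 1) else svBLoop t (i + 1)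

def second_vowel_alt (s : String) : Int := svBLoop s.toList 0

-- ===== PRECONDITION & SPEC =====
def Spec_second_vowel (s : String) (out : Int) : Prop := out = second_vowel_alt s
instance (s : String) (out : Int) : Decidable (Spec_second_vowel s out) := by unfold Spec_second_vowel; infer_instance

-- ===== CLAIM (what is proved, stated in full; the proofs are below) =====
def Claim_equal_second_vowel : Prop := ∀ (s : String), Dom_second_vowel s → Spec_second_vowel s (second_vowel s)

-- ===== LEMMAS AND PROOFS =====
-- with counter 1, A's loop is exactly a search for a char in "aeiouy"
theorem svALoop_one (t : List Char) (i : Int) : svALoop t i 1 = svFindFrom t i := by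
  induction t generalizing i with
  | nil => rfl
  | cons ch t ih =>
    simp only [svALoop, svFindFrom]
    by_cases ha : ch = 'a' <;> by_cases he : ch = 'e' <;> by_cases hi : ch = 'i' <;>
      by_cases ho : ch = 'o' <;> by_cases hu : ch = 'u' <;> by_cases hy : ch = 'y' <;>
      simp_all

-- with counter 0, A's loop is exactly B's loop
theorem svALoop_zero (t : List Char) (i : Int) : svALoop t i 0 = svBLoop t i := by
  induction t generalizing i with
  | nil => rfl
  | cons ch t ih =>
    simp only [svALoop, svBLoop]
    by_cases ha : ch = 'a' <;> by_cases he : ch = 'e' <;> by_cases hi : ch = 'i' <;>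
      by_cases ho : ch = 'o' <;> by_cases hu : ch = 'u' <;>
      simp_all [svALoop_one]

-- ===== VERDICT (by name: the statement is the Claim_ definition above) =====
theorem second_vowel_spec : Claim_equal_second_vowel := by
  intro s _
  show second_vowel s = second_vowel_alt s
  simp [second_vowel, second_vowel_alt, svALoop_zero]
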